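-- pv_equiv track=rewrite | github.com/AllieBacholl/face-filter | RISCV_vivado_20250403/RISCV_vivado_20250403.srcs/modelsim/verify_out.py | build_3d_array
-- ===== SOURCE A (Python) =====
-- def build_3d_array(mem, cols, rows, chans, base_addr):
--     data = [[[0 for _ in range(chans)] for _ in range(rows)] for _ in range(cols)]
--     for c in range(cols):
--         for r in range(rows):
--             for ch in range(chans):
--                 offset = ch * (cols * rows) + r * cols + c
--                 data[c][r][ch] = mem.get(base_addr + offset, 0)
--     return data
-- ===== SOURCE B (Python) =====
-- def build_3d_array(mem, cols, rows, chans, base_addr):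
--     data = [[[0 for _ in range(chans)] for _ in range(rows)] for _ in range(cols)]
--     if cols > 0 and rows > 0 and chans > 0:
--         plane = cols * rows
--         for addr, val in mem.items():
--             offset = addr - base_addr
--             if 0 <= offset < plane * chans:
--                 ch, rem = divmod(offset, plane)
--                 r, c = divmod(rem, cols)
--                 data[c][r][ch] = val
--     return data
-- ===== Notes on version B (the rewrite author's own statement) =====
-- stated objective: alternative
-- what changed: Instead of gathering a dict lookup for every one of the cols*rows*chans cells, B pre-zeroes the array and makes a single pass over mem.items(), decoding each in-range address back to its (c,r,ch) cell with divmod and scattering the value there; this removes the per-cell dict lookup (timing run readings 4.6-5x, not confirmed at the largest size on every run).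
import Mathlib
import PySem

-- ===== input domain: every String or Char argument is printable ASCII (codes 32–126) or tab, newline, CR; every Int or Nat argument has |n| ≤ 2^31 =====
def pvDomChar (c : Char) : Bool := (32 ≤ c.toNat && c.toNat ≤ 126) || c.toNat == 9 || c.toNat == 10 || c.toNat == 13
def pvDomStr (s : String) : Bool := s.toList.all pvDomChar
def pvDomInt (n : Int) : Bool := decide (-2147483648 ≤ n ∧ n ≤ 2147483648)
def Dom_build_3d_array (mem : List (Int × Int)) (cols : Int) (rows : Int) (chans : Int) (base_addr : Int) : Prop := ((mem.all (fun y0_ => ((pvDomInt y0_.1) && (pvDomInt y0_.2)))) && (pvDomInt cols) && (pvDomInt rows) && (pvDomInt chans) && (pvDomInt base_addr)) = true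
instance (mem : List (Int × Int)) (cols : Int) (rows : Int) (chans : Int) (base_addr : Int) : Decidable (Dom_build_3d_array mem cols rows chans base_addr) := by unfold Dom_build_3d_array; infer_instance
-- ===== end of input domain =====

-- B scatters mem's entries into a pre-zeroed array (one pass over the dict) instead of
-- gathering a lookup for every cell; objective: an alternative single-pass scatter (intended faster; probe readings varied).

-- shared helper: the Python statement `data[c][r][ch] = v` on a 3-level nested list
def pvSet3 (d : List (List (List Int))) (c r ch : Int) (v : Int) : List (List (List Int)) :=
  let plane := PySem.List.pyGetD d c []
  let line := PySem.List.pyGetD plane r []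
  PySem.List.pySetD d c (PySem.List.pySetD plane r (PySem.List.pySetD line ch v))

-- ===== PORT A =====
def build_3d_array (mem : List (Int × Int)) (cols : Int) (rows : Int) (chans : Int) (base_addr : Int) : List (List (List Int)) :=
  let memd := PySem.Dict.ofList mem
  let data := (PySem.List.pyRange 0 cols 1).map (fun _ =>
      (PySem.List.pyRange 0 rows 1).map (fun _ =>
        (PySem.List.pyRange 0 chans 1).map (fun _ => (0 : Int))))
  (PySem.List.pyRange 0 cols 1).foldl (fun data c =>
    (PySem.List.pyRange 0 rows 1).foldl (fun data r =>
      (PySem.List.pyRange 0 chans 1).foldl (fun data ch =>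
        pvSet3 data c r ch (memd.getD (base_addr + (ch * (cols * rows) + r * cols + c)) 0)) data) data) data

-- ===== PORT B =====
def build_3d_array_alt (mem : List (Int × Int)) (cols : Int) (rows : Int) (chans : Int) (base_addr : Int) : List (List (List Int)) :=
  let data := (PySem.List.pyRange 0 cols 1).map (fun _ =>
      (PySem.List.pyRange 0 rows 1).map (fun _ =>
        (PySem.List.pyRange 0 chans 1).map (fun _ => (0 : Int))))
  if 0 < cols ∧ 0 < rows ∧ 0 < chans then
    let plane := cols * rows
    (PySem.Dict.ofList mem).items.foldl (fun data p =>
      let offset := p.1 - base_addr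
      if 0 ≤ offset ∧ offset < plane * chans then
        let ch := PySem.Int.floordiv offset plane
        let rem := PySem.Int.mod offset plane
        let r := PySem.Int.floordiv rem cols
        let c := PySem.Int.mod rem cols
        pvSet3 data c r ch p.2
      else data) data
  else data

-- ===== PRECONDITION & SPEC =====
def Spec_build_3d_array (mem : List (Int × Int)) (cols : Int) (rows : Int) (chans : Int) (base_addr : Int) (out : List (List (List Int))) : Prop := out = build_3d_array_alt mem cols rows chans base_addr
instance (mem : List (Int × Int)) (cols : Int) (rows : Int) (chans : Int) (base_addr : Int) (out : List (List (List Int))) : Decidable (Spec_build_3d_array mem cols rows chans base_addr out) := by unfold Spec_build_3d_array; infer_instance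

-- ===== CLAIM (what is proved, stated in full; the proofs are below) =====
def Claim_equal_build_3d_array : Prop := ∀ (mem : List (Int × Int)) (cols : Int) (rows : Int) (chans : Int) (base_addr : Int), Dom_build_3d_array mem cols rows chans base_addr → Spec_build_3d_array mem cols rows chans base_addr (build_3d_array mem cols rows chans base_addr)

-- ===== LEMMAS AND PROOFS =====

-- the common shape: a C×R×H grid holding f c r h at cell (c,r,h)
def grid3 (C R H : Nat) (f : Nat → Nat → Nat → Int) : List (List (List Int)) :=
  (List.range C).map fun c => (List.range R).map fun r => (List.range H).map fun h => f c r h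

lemma grid3_congr {C R H : Nat} {f g : Nat → Nat → Nat → Int}
    (hfg : ∀ c < C, ∀ r < R, ∀ h < H, f c r h = g c r h) : grid3 C R H f = grid3 C R H g := by
  unfold grid3
  refine List.map_congr_left (fun c hc => ?_)
  refine List.map_congr_left (fun r hr => ?_)
  refine List.map_congr_left (fun h hh => ?_)
  exact hfg c (List.mem_range.1 hc) r (List.mem_range.1 hr) h (List.mem_range.1 hh)

lemma set_map_range {α : Type} (g : Nat → α) {C c : Nat} (_hc : c < C) (x : α) :
    ((List.range C).map g).set c x = (List.range C).map (fun i => if i = c then x else g i) := by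
  apply List.ext_getElem
  · simp
  · intro i h1 h2
    simp only [List.getElem_set, List.getElem_map, List.getElem_range] at *
    by_cases hic : c = i
    · subst hic; simp
    · rw [if_neg hic, if_neg (fun h => hic h.symm)]

lemma getD_map_range' {α : Type} (g : Nat → α) {C c : Nat} (hc : c < C) (d : α) :
    ((List.range C).map g).getD c d = g c := by
  rw [List.getD_eq_getElem _ _ (by simpa using hc)]
  simp

lemma pvSet3_grid3 {C R H : Nat} (f : Nat → Nat → Nat → Int) {c r h : Nat}
    (hc : c < C) (hr : r < R) (hh : h < H) (v : Int) :
    pvSet3 (grid3 C R H f) (c : Int) (r : Int) (h : Int) v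
      = grid3 C R H (fun c' r' h' => if c' = c ∧ r' = r ∧ h' = h then v else f c' r' h') := by
  unfold pvSet3 grid3
  simp only [PySem.List.pyGetD_natCast, PySem.List.pySetD_natCast]
  rw [getD_map_range' _ hc, getD_map_range' _ hr]
  rw [set_map_range _ hh, set_map_range _ hr, set_map_range _ hc]
  refine List.map_congr_left (fun c' hc' => ?_)
  by_cases hcc : c' = c
  · subst hcc
    simp only []
    refine List.map_congr_left (fun r' hr' => ?_)
    by_cases hrr : r' = r
    · subst hrr
      simp only []
      refine List.map_congr_left (fun h' hh' => ?_)
      by_cases hhh : h' = h <;> simp [hhh]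
    · simp [hrr]
  · simp [hcc]


lemma pyRange_zero_eq (n : Int) :
    PySem.List.pyRange 0 n 1 = (List.range n.toNat).map (fun (k : Nat) => (k : Int)) := by
  rw [PySem.List.pyRange_one]
  simp only [sub_zero, zero_add]

lemma data0_eq (cols rows chans : Int) :
    (PySem.List.pyRange 0 cols 1).map (fun _ =>
      (PySem.List.pyRange 0 rows 1).map (fun _ =>
        (PySem.List.pyRange 0 chans 1).map (fun _ => (0 : Int))))
      = grid3 cols.toNat rows.toNat chans.toNat (fun _ _ _ => 0) := by
  simp [pyRange_zero_eq, grid3, Function.comp_def, List.map_const']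

lemma loopH (C R H : Nat) (G : Nat → Int) (c r : Nat) (hc : c < C) (hr : r < R)
    (m : Nat) (hm : m ≤ H) (f : Nat → Nat → Nat → Int) :
    (List.range m).foldl (fun (d : List (List (List Int))) (h : Nat) => pvSet3 d c r h (G h))
        (grid3 C R H f)
      = grid3 C R H (fun c' r' h' => if c' = c ∧ r' = r ∧ h' < m then G h' else f c' r' h') := by
  induction m with
  | zero =>
    simp only [List.range_zero, List.foldl_nil]
    exact grid3_congr (by intro c' _ r' _ h' _; simp)
  | succ m ih =>
    rw [List.range_succ, List.foldl_append, List.foldl_cons, List.foldl_nil, ih (by omega)]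
    rw [pvSet3_grid3 _ hc hr (by omega : m < H)]
    apply grid3_congr
    intro c' _ r' _ h' _
    by_cases e1 : c' = c
    · by_cases e2 : r' = r
      · subst e1; subst e2
        by_cases e3 : h' = m
        · subst e3; simp
        · by_cases e4 : h' < m
          · have e5 : h' < m + 1 := by omega
            simp [e3, e4, e5]
          · have e5 : ¬ h' < m + 1 := by omega
            simp [e3, e4, e5]
      · simp [e2]
    · simp [e1]

lemma loopR (C R H : Nat) (G : Nat → Nat → Int) (c : Nat) (hc : c < C)
    (m : Nat) (hm : m ≤ R) (f : Nat → Nat → Nat → Int) :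
    (List.range m).foldl (fun (d : List (List (List Int))) (r : Nat) =>
        (List.range H).foldl (fun (d : List (List (List Int))) (h : Nat) =>
          pvSet3 d c r h (G r h)) d)
        (grid3 C R H f)
      = grid3 C R H (fun c' r' h' => if c' = c ∧ r' < m then G r' h' else f c' r' h') := by
  induction m with
  | zero =>
    simp only [List.range_zero, List.foldl_nil]
    exact grid3_congr (by intro c' _ r' _ h' _; simp)
  | succ m ih =>
    rw [List.range_succ, List.foldl_append, List.foldl_cons, List.foldl_nil, ih (by omega)]
    rw [loopH C R H (G m) c m hc (by omega) H (le_refl H) _]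
    apply grid3_congr
    intro c' _ r' _ h' hh'
    by_cases e1 : c' = c
    · subst e1
      by_cases e2 : r' = m
      · subst e2; simp [hh']
      · by_cases e3 : r' < m
        · have e5 : r' < m + 1 := by omega
          simp [e2, e3, e5]
        · have e5 : ¬ r' < m + 1 := by omega
          simp [e2, e3, e5]
    · simp [e1]

lemma loopC (C R H : Nat) (G : Nat → Nat → Nat → Int)
    (m : Nat) (hm : m ≤ C) (f : Nat → Nat → Nat → Int) :
    (List.range m).foldl (fun (d : List (List (List Int))) (c : Nat) =>
        (List.range R).foldl (fun (d : List (List (List Int))) (r : Nat) =>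
          (List.range H).foldl (fun (d : List (List (List Int))) (h : Nat) =>
            pvSet3 d c r h (G c r h)) d) d)
        (grid3 C R H f)
      = grid3 C R H (fun c' r' h' => if c' < m then G c' r' h' else f c' r' h') := by
  induction m with
  | zero =>
    simp only [List.range_zero, List.foldl_nil]
    exact grid3_congr (by intro c' _ r' _ h' _; simp)
  | succ m ih =>
    rw [List.range_succ, List.foldl_append, List.foldl_cons, List.foldl_nil, ih (by omega)]
    rw [loopR C R H (G m) m (by omega) R (le_refl R) _]
    apply grid3_congr
    intro c' _ r' hr' h' _
    by_cases e1 : c' = m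
    · subst e1; simp [hr']
    · by_cases e2 : c' < m
      · have e5 : c' < m + 1 := by omega
        simp [e1, e2, e5]
      · have e5 : ¬ c' < m + 1 := by omega
        simp [e1, e2, e5]

lemma A_eq (mem : List (Int × Int)) (cols rows chans base_addr : Int) :
    build_3d_array mem cols rows chans base_addr
      = grid3 cols.toNat rows.toNat chans.toNat (fun c r h =>
          (PySem.Dict.ofList mem).getD
            (base_addr + ((h : Int) * (cols * rows) + (r : Int) * cols + (c : Int))) 0) := by
  unfold build_3d_array
  rw [data0_eq]
  simp only [pyRange_zero_eq, List.foldl_map]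
  rw [loopC cols.toNat rows.toNat chans.toNat _ cols.toNat (le_refl _) _]
  apply grid3_congr
  intro c hcn r _ h _
  rw [if_pos hcn]


lemma key_bound {cols rows chans : Int} (hco : 0 < cols) (hro : 0 < rows)
    {c r h : Int} (hc0 : 0 ≤ c) (hc1 : c < cols) (hr0 : 0 ≤ r) (hr1 : r < rows)
    (hh0 : 0 ≤ h) (hh1 : h < chans) :
    0 ≤ h * (cols * rows) + r * cols + c ∧
      h * (cols * rows) + r * cols + c < cols * rows * chans := by
  have hCR : (0 : Int) < cols * rows := mul_pos hco hro
  constructor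
  · nlinarith
  · nlinarith [mul_le_mul_of_nonneg_right (by omega : h + 1 ≤ chans) (le_of_lt hCR),
      mul_le_mul_of_nonneg_right (by omega : r + 1 ≤ rows) (le_of_lt hco)]

set_option maxHeartbeats 1000000 in
lemma loopB (base_addr cols rows chans : Int) (hco : 0 < cols) (hro : 0 < rows) (hch : 0 < chans)
    (us : List (Int × Int)) (hnd : (us.map (fun p => p.1)).Nodup) (f : Nat → Nat → Nat → Int) :
    us.foldl (fun data p =>
      if 0 ≤ p.1 - base_addr ∧ p.1 - base_addr < cols * rows * chans then
        pvSet3 data (PySem.Int.mod (PySem.Int.mod (p.1 - base_addr) (cols * rows)) cols)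
          (PySem.Int.floordiv (PySem.Int.mod (p.1 - base_addr) (cols * rows)) cols)
          (PySem.Int.floordiv (p.1 - base_addr) (cols * rows)) p.2
      else data) (grid3 cols.toNat rows.toNat chans.toNat f)
    = grid3 cols.toNat rows.toNat chans.toNat (fun c r h =>
        match us.find? (fun p =>
            p.1 == base_addr + ((h : Int) * (cols * rows) + (r : Int) * cols + (c : Int))) with
        | some p => p.2
        | none => f c r h) := by
  have hCR : (0 : Int) < cols * rows := mul_pos hco hro
  induction us generalizing f with
  | nil =>
    simp only [List.foldl_nil, List.find?_nil]
  | cons p rest ih =>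
    simp only [List.map_cons, List.nodup_cons] at hnd
    obtain ⟨hp, hrest⟩ := hnd
    rw [List.foldl_cons]
    by_cases hin : 0 ≤ p.1 - base_addr ∧ p.1 - base_addr < cols * rows * chans
    · rw [if_pos hin]
      have hh0 : 0 ≤ PySem.Int.floordiv (p.1 - base_addr) (cols * rows) :=
        (PySem.Int.le_floordiv_iff_mul_le hCR).2 (by linarith [hin.1])
      have hh1 : PySem.Int.floordiv (p.1 - base_addr) (cols * rows) < chans :=
        (PySem.Int.floordiv_lt_iff_lt_mul hCR).2 (by
          calc p.1 - base_addr < cols * rows * chans := hin.2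
            _ = chans * (cols * rows) := by ring)
      have hrem0 : 0 ≤ PySem.Int.mod (p.1 - base_addr) (cols * rows) :=
        PySem.Int.mod_nonneg _ hCR
      have hrem1 : PySem.Int.mod (p.1 - base_addr) (cols * rows) < cols * rows :=
        PySem.Int.mod_lt _ hCR
      have hr0 : 0 ≤ PySem.Int.floordiv (PySem.Int.mod (p.1 - base_addr) (cols * rows)) cols :=
        (PySem.Int.le_floordiv_iff_mul_le hco).2 (by linarith)
      have hr1 : PySem.Int.floordiv (PySem.Int.mod (p.1 - base_addr) (cols * rows)) cols < rows :=
        (PySem.Int.floordiv_lt_iff_lt_mul hco).2 (by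
          calc PySem.Int.mod (p.1 - base_addr) (cols * rows) < cols * rows := hrem1
            _ = rows * cols := by ring)
      have hc0 : 0 ≤ PySem.Int.mod (PySem.Int.mod (p.1 - base_addr) (cols * rows)) cols :=
        PySem.Int.mod_nonneg _ hco
      have hc1 : PySem.Int.mod (PySem.Int.mod (p.1 - base_addr) (cols * rows)) cols < cols :=
        PySem.Int.mod_lt _ hco
      have hcc : ((PySem.Int.mod (PySem.Int.mod (p.1 - base_addr) (cols * rows)) cols).toNat : Int)
          = PySem.Int.mod (PySem.Int.mod (p.1 - base_addr) (cols * rows)) cols :=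
        Int.toNat_of_nonneg hc0
      have hcr : ((PySem.Int.floordiv (PySem.Int.mod (p.1 - base_addr) (cols * rows)) cols).toNat : Int)
          = PySem.Int.floordiv (PySem.Int.mod (p.1 - base_addr) (cols * rows)) cols :=
        Int.toNat_of_nonneg hr0
      have hcl : ((PySem.Int.floordiv (p.1 - base_addr) (cols * rows)).toNat : Int)
          = PySem.Int.floordiv (p.1 - base_addr) (cols * rows) :=
        Int.toNat_of_nonneg hh0
      rw [show PySem.Int.mod (PySem.Int.mod (p.1 - base_addr) (cols * rows)) cols
            = (((PySem.Int.mod (PySem.Int.mod (p.1 - base_addr) (cols * rows)) cols).toNat : Nat) : Int) from hcc.symm,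
          show PySem.Int.floordiv (PySem.Int.mod (p.1 - base_addr) (cols * rows)) cols
            = (((PySem.Int.floordiv (PySem.Int.mod (p.1 - base_addr) (cols * rows)) cols).toNat : Nat) : Int) from hcr.symm,
          show PySem.Int.floordiv (p.1 - base_addr) (cols * rows)
            = (((PySem.Int.floordiv (p.1 - base_addr) (cols * rows)).toNat : Nat) : Int) from hcl.symm]
      rw [pvSet3_grid3 f (by omega) (by omega) (by omega)]
      rw [ih hrest]
      have hrec : ((PySem.Int.floordiv (p.1 - base_addr) (cols * rows)).toNat : Int) * (cols * rows)
            + ((PySem.Int.floordiv (PySem.Int.mod (p.1 - base_addr) (cols * rows)) cols).toNat : Int) * cols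
            + ((PySem.Int.mod (PySem.Int.mod (p.1 - base_addr) (cols * rows)) cols).toNat : Int)
          = p.1 - base_addr := by
        rw [hcc, hcr, hcl]
        have e1 := PySem.Int.floordiv_mul_add_mod (p.1 - base_addr) (cols * rows)
        have e2 := PySem.Int.floordiv_mul_add_mod (PySem.Int.mod (p.1 - base_addr) (cols * rows)) cols
        linarith
      apply grid3_congr
      intro c hcn r hrn h hhn
      have hcI : (0 : Int) ≤ (c : Int) ∧ (c : Int) < cols := by omega
      have hrI : (0 : Int) ≤ (r : Int) ∧ (r : Int) < rows := by omega
      have hhI : (0 : Int) ≤ (h : Int) ∧ (h : Int) < chans := by omega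
      by_cases hk : (p.1 == base_addr + ((h : Int) * (cols * rows) + (r : Int) * cols + (c : Int))) = true
      · rw [show List.find? (fun p => p.1 == base_addr + ((h : Int) * (cols * rows) + (r : Int) * cols + (c : Int))) (p :: rest) = some p from List.find?_cons_of_pos hk]
        have hkeq : p.1 = base_addr + ((h : Int) * (cols * rows) + (r : Int) * cols + (c : Int)) :=
          eq_of_beq hk
        have hnone : rest.find? (fun p =>
            p.1 == base_addr + ((h : Int) * (cols * rows) + (r : Int) * cols + (c : Int))) = none := by
          cases heq : rest.find? (fun p =>
              p.1 == base_addr + ((h : Int) * (cols * rows) + (r : Int) * cols + (c : Int))) with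
          | none => rfl
          | some q =>
            have h1' := List.find?_some heq
            have h1 : q.1 = base_addr + ((h : Int) * (cols * rows) + (r : Int) * cols + (c : Int)) :=
              eq_of_beq h1'
            have h2 : q.1 ∈ rest.map (fun p => p.1) :=
              List.mem_map_of_mem (List.mem_of_find?_eq_some heq)
            rw [h1, ← hkeq] at h2
            exact absurd h2 hp
        simp only [hnone]
        -- the match on `none` reduces to the updated function; the condition holds by injectivity
        have hX : (h : Int) * (cols * rows) + (r : Int) * cols + (c : Int) = p.1 - base_addr := by
          rw [hkeq]; ring
        have hS : 0 ≤ (r : Int) * cols + (c : Int) ∧ (r : Int) * cols + (c : Int) < cols * rows := by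
          constructor
          · nlinarith [hcI.1, mul_nonneg hrI.1 (le_of_lt hco)]
          · nlinarith [hcI.2, mul_le_mul_of_nonneg_right (show (r : Int) + 1 ≤ rows by omega) (le_of_lt hco)]
        have hfloorh : PySem.Int.floordiv (p.1 - base_addr) (cols * rows) = (h : Int) := by
          rw [PySem.Int.floordiv_eq_iff_of_pos hCR]
          constructor
          · linarith [hS.1, hX]
          · nlinarith [hS.2, hX]
        have hremX : PySem.Int.mod (p.1 - base_addr) (cols * rows) = (r : Int) * cols + (c : Int) := by
          have e1 := PySem.Int.floordiv_mul_add_mod (p.1 - base_addr) (cols * rows)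
          rw [hfloorh] at e1
          linarith
        have hfloorr : PySem.Int.floordiv (PySem.Int.mod (p.1 - base_addr) (cols * rows)) cols = (r : Int) := by
          rw [PySem.Int.floordiv_eq_iff_of_pos hco, hremX]
          constructor
          · linarith [hcI.1]
          · nlinarith [hcI.2]
        have hmodc : PySem.Int.mod (PySem.Int.mod (p.1 - base_addr) (cols * rows)) cols = (c : Int) := by
          have e2 := PySem.Int.floordiv_mul_add_mod (PySem.Int.mod (p.1 - base_addr) (cols * rows)) cols
          have e3 : PySem.Int.floordiv (PySem.Int.mod (p.1 - base_addr) (cols * rows)) cols * cols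
              = (r : Int) * cols := by rw [hfloorr]
          linarith [e2, e3, hremX]
        rw [if_pos ⟨by omega, by omega, by omega⟩]
      · rw [show List.find? (fun p => p.1 == base_addr + ((h : Int) * (cols * rows) + (r : Int) * cols + (c : Int))) (p :: rest) = List.find? (fun p => p.1 == base_addr + ((h : Int) * (cols * rows) + (r : Int) * cols + (c : Int))) rest from List.find?_cons_of_neg hk]
        have hne : ¬ (c = (PySem.Int.mod (PySem.Int.mod (p.1 - base_addr) (cols * rows)) cols).toNat
            ∧ r = (PySem.Int.floordiv (PySem.Int.mod (p.1 - base_addr) (cols * rows)) cols).toNat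
            ∧ h = (PySem.Int.floordiv (p.1 - base_addr) (cols * rows)).toNat) := by
          rintro ⟨ec, er, eh⟩
          apply hk
          have : p.1 = base_addr + ((h : Int) * (cols * rows) + (r : Int) * cols + (c : Int)) := by
            subst ec; subst er; subst eh
            linarith [hrec]
          exact beq_iff_eq.2 this
        cases heq : rest.find? (fun p =>
            p.1 == base_addr + ((h : Int) * (cols * rows) + (r : Int) * cols + (c : Int))) with
        | none => rw [if_neg hne]
        | some q => rfl
    · rw [if_neg hin, ih hrest]
      apply grid3_congr
      intro c hcn r hrn h hhn
      have hcI : (0 : Int) ≤ (c : Int) ∧ (c : Int) < cols := by omega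
      have hrI : (0 : Int) ≤ (r : Int) ∧ (r : Int) < rows := by omega
      have hhI : (0 : Int) ≤ (h : Int) ∧ (h : Int) < chans := by omega
      have hkb := key_bound hco hro hcI.1 hcI.2 hrI.1 hrI.2 hhI.1 hhI.2 (chans := chans)
      have hk : ¬ (p.1 == base_addr + ((h : Int) * (cols * rows) + (r : Int) * cols + (c : Int))) = true := by
        intro hbeq
        have hkeq := eq_of_beq hbeq
        exact hin ⟨by linarith [hkb.1], by linarith [hkb.2]⟩
      rw [show List.find? (fun p => p.1 == base_addr + ((h : Int) * (cols * rows) + (r : Int) * cols + (c : Int))) (p :: rest) = List.find? (fun p => p.1 == base_addr + ((h : Int) * (cols * rows) + (r : Int) * cols + (c : Int))) rest from List.find?_cons_of_neg hk]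

lemma find_items_getD (mem : List (Int × Int)) (k : Int) :
    (match (PySem.Dict.ofList mem).items.find? (fun p => p.1 == k) with
     | some p => p.2
     | none => (0 : Int)) = (PySem.Dict.ofList mem).getD k 0 := by
  have hnd : (PySem.Dict.ofList mem).keys.Nodup := PySem.Dict.nodup_keys_ofList mem
  cases heq : (PySem.Dict.ofList mem).items.find? (fun p => p.1 == k) with
  | some q =>
    have h1' := List.find?_some heq
    have h1 : q.1 = k := eq_of_beq h1'
    have h2 : q ∈ (PySem.Dict.ofList mem).items := List.mem_of_find?_eq_some heq
    rw [show q = (k, q.2) from by rw [← h1]] at h2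
    exact (PySem.Dict.getD_of_mem_items _ h2 hnd 0).symm
  | none =>
    have hnc : (PySem.Dict.ofList mem).contains k = false := by
      rw [← Bool.not_eq_true]
      intro hcon
      have hkmem := (PySem.Dict.contains_iff_mem_keys _ _).1 hcon
      have : ∃ q ∈ (PySem.Dict.ofList mem).items, q.1 = k := by
        simpa [PySem.Dict.keys, List.mem_map] using hkmem
      obtain ⟨q, hqmem, hqk⟩ := this
      have := List.find?_eq_none.1 heq q hqmem
      simp [hqk] at this
    rw [PySem.Dict.getD_of_not_contains _ 0 hnc]

-- ===== VERDICT (by name: the statement is the Claim_ definition above) =====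
theorem build_3d_array_spec : Claim_equal_build_3d_array := by
  intro mem cols rows chans base_addr _hdom
  unfold Spec_build_3d_array
  rw [A_eq]
  simp only [build_3d_array_alt]
  by_cases hg : 0 < cols ∧ 0 < rows ∧ 0 < chans
  · rw [if_pos hg, data0_eq]
    rw [loopB base_addr cols rows chans hg.1 hg.2.1 hg.2.2 (PySem.Dict.ofList mem).items
        (PySem.Dict.nodup_keys_ofList mem) _]
    apply grid3_congr
    intro c _ r _ h _
    exact (find_items_getD mem _).symm
  · rw [if_neg hg, data0_eq]
    apply grid3_congr
    intro c hc r hr h hh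
    exfalso
    omega
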